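-- pv_equiv track=rewrite | github.com/bansakdo/Algorithm | programmers/Kakao/Intern 2020/Keypad.py | solution
-- ===== SOURCE A (Python) =====
-- def solution(numbers, hand):
--     answer = ''
--     now = [[3, 0], [3, 2]]
--
--     for num in numbers:
--         if num == '*':
--             answer += 'L'
--             now[0] = [3, 0]
--         elif num == '#':
--             answer += 'R'
--             now[0] = [3, 2]
--         else:
--             if num == 0:
--                 num_pos = [3, 1]
--             else:
--                 num_pos = [(num - 1) // 3, (num - 1) % 3]
--             if num in [1, 4, 7]:
--                 answer += 'L'
--                 now[0] = num_pos
--             elif num in [3, 6, 9]: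
--                 answer += 'R'
--                 now[1] = num_pos
--             else:
--                 L_dis = abs(now[0][0] - num_pos[0]) + abs(now[0][1] - num_pos[1])
--                 R_dis = abs(now[1][0] - num_pos[0]) + abs(now[1][1] - num_pos[1])
--                 if L_dis > R_dis or (L_dis == R_dis and hand == "right"):
--                     answer += "R"
--                     now[1] = num_pos
--                 elif L_dis < R_dis or (L_dis == R_dis and hand == "left"):
--                     answer += "L"
--                     now[0] = num_pos
--
--     return answer
-- ===== SOURCE B (Python) =====
-- def solution(numbers, hand):
--     # Divide and conquer: the scan is a state-threading monoid action, so solve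
--     # each half independently-in-structure and stitch: answer = left-half answer
--     # + right-half answer computed from the left half's final thumb state.
--     def press(n, left, right):
--         # one key press: (emitted char, new left thumb, new right thumb)
--         pos = (3, 1) if n == 0 else ((n - 1) // 3, (n - 1) % 3)
--         if n in (1, 4, 7):
--             return 'L', pos, right
--         if n in (3, 6, 9):
--             return 'R', left, pos
--         dl = abs(left[0] - pos[0]) + abs(left[1] - pos[1])
--         dr = abs(right[0] - pos[0]) + abs(right[1] - pos[1])
--         if dl > dr or (dl == dr and hand == "right"):
--             return 'R', left, pos
--         if dl < dr or (dl == dr and hand == "left"):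
--             return 'L', pos, right
--         return '', left, right
--
--     def solve(nums, left, right):
--         if not nums:
--             return '', left, right
--         if len(nums) == 1:
--             return press(nums[0], left, right)
--         mid = len(nums) // 2
--         a1, l1, r1 = solve(nums[:mid], left, right)
--         a2, l2, r2 = solve(nums[mid:], l1, r1)
--         return a1 + a2, l2, r2
--
--     return solve(numbers, (3, 0), (3, 2))[0]
-- ===== Notes on version B (the rewrite author's own statement) =====
-- stated objective: alternative
-- what changed: B replaces A's single left-to-right loop mutating a now[] list of coordinate pairs with a divide-and-conquer recursion: split the key list at the midpoint, solve each half (threading the two thumb positions through), and concatenate the half-answers; a pure per-key 'press' helper returns (char, new state) instead of in-place mutation and string +=.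
import Mathlib
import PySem

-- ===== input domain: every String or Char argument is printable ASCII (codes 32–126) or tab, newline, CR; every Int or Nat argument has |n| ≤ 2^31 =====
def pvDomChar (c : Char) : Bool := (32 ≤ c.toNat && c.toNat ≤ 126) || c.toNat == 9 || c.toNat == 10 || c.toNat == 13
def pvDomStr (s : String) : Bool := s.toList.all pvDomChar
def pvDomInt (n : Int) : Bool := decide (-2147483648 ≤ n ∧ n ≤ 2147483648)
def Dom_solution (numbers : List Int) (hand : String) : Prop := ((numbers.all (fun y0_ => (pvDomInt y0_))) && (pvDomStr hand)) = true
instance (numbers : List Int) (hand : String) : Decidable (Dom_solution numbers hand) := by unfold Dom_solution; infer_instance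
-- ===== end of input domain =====

-- B replaces A's single accumulator loop by a divide-and-conquer recursion over the key
-- list (split at the midpoint, thread thumb state through the halves, concatenate answers).
-- ===== PORT A =====
-- state: (answer, now[0], now[1]); the Python 'num == '*'' / 'num == '#'' branches compare
-- an int with a str, which is always False in Python, so they are never taken for int input.
def solutionStep (hand : String) (st : String × (Int × Int) × (Int × Int)) (num : Int) :
    String × (Int × Int) × (Int × Int) :=
  let answer := st.1
  let now0 := st.2.1
  let now1 := st.2.2
  let num_pos : Int × Int :=
    if num = 0 then (3, 1)
    else (PySem.Int.floordiv (num - 1) 3, PySem.Int.mod (num - 1) 3)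
  if num = 1 ∨ num = 4 ∨ num = 7 then
    (answer ++ "L", num_pos, now1)
  else if num = 3 ∨ num = 6 ∨ num = 9 then
    (answer ++ "R", now0, num_pos)
  else
    let L_dis : Int := |now0.1 - num_pos.1| + |now0.2 - num_pos.2|
    let R_dis : Int := |now1.1 - num_pos.1| + |now1.2 - num_pos.2|
    if L_dis > R_dis ∨ (L_dis = R_dis ∧ hand = "right") then
      (answer ++ "R", now0, num_pos)
    else if L_dis < R_dis ∨ (L_dis = R_dis ∧ hand = "left") then
      (answer ++ "L", num_pos, now1)
    else
      (answer, now0, now1)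

def solution (numbers : List Int) (hand : String) : String :=
  (numbers.foldl (solutionStep hand) ("", (3, 0), (3, 2))).1

-- ===== PORT B =====
-- one key press: (emitted char as a string, new left thumb, new right thumb)
def altPress (hand : String) (n : Int) (left right : Int × Int) :
    String × (Int × Int) × (Int × Int) :=
  let pos : Int × Int :=
    if n = 0 then (3, 1) else (PySem.Int.floordiv (n - 1) 3, PySem.Int.mod (n - 1) 3)
  if n = 1 ∨ n = 4 ∨ n = 7 then ("L", pos, right)
  else if n = 3 ∨ n = 6 ∨ n = 9 then ("R", left, pos)
  else
    let dl : Int := |left.1 - pos.1| + |left.2 - pos.2|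
    let dr : Int := |right.1 - pos.1| + |right.2 - pos.2|
    if dl > dr ∨ (dl = dr ∧ hand = "right") then ("R", left, pos)
    else if dl < dr ∨ (dl = dr ∧ hand = "left") then ("L", pos, right)
    else ("", left, right)

-- divide and conquer: solve each half, thread the thumb state, concatenate the answers
def altSolve (hand : String) : List Int → (Int × Int) → (Int × Int) →
    String × (Int × Int) × (Int × Int)
  | [], left, right => ("", left, right)
  | [n], left, right => altPress hand n left right
  | n :: m :: t, left, right =>
    let mid := (n :: m :: t).length / 2
    let s1 := altSolve hand ((n :: m :: t).take mid) left right
    let s2 := altSolve hand ((n :: m :: t).drop mid) s1.2.1 s1.2.2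
    (s1.1 ++ s2.1, s2.2)
termination_by nums _ _ => nums.length
decreasing_by
  · simp [List.length_take]; omega
  · simp; omega

def solution_alt (numbers : List Int) (hand : String) : String :=
  (altSolve hand numbers (3, 0) (3, 2)).1

-- ===== PRECONDITION & SPEC =====
def Spec_solution (numbers : List Int) (hand : String) (out : String) : Prop := out = solution_alt numbers hand
instance (numbers : List Int) (hand : String) (out : String) : Decidable (Spec_solution numbers hand out) := by unfold Spec_solution; infer_instance

-- ===== CLAIM (what is proved, stated in full; the proofs are below) =====
def Claim_equal_solution : Prop := ∀ (numbers : List Int) (hand : String), Dom_solution numbers hand → Spec_solution numbers hand (solution numbers hand)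

-- ===== LEMMAS AND PROOFS =====

-- A's step on (s, l, r) appends exactly the char B's press emits and reaches B's state
theorem step_press (hand : String) (s : String) (l r : Int × Int) (n : Int) :
    solutionStep hand (s, l, r) n =
      (s ++ (altPress hand n l r).1, (altPress hand n l r).2) := by
  unfold solutionStep altPress
  dsimp only
  split_ifs <;> simp

-- the fold from any state equals B's divide-and-conquer result with the prefix kept
theorem fold_solve (hand : String) (k : Nat) :
    ∀ (nums : List Int), nums.length ≤ k → ∀ (s : String) (l r : Int × Int),
      nums.foldl (solutionStep hand) (s, l, r) =
        (s ++ (altSolve hand nums l r).1, (altSolve hand nums l r).2) := by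
  induction k with
  | zero =>
    intro nums h s l r
    have : nums = [] := List.length_eq_zero_iff.mp (Nat.le_zero.mp h)
    subst this
    simp [altSolve]
  | succ k ih =>
    intro nums h s l r
    match nums with
    | [] => simp [altSolve]
    | [n] =>
      simp only [List.foldl, altSolve]
      exact step_press hand s l r n
    | n :: m :: t =>
      rw [altSolve]
      have hmid : ((n :: m :: t).length / 2) ≤ (n :: m :: t).length := Nat.div_le_self _ _
      have h1 : ((n :: m :: t).take ((n :: m :: t).length / 2)).length ≤ k := by
        simp [List.length_take]; simp at h; omega
      have h2 : ((n :: m :: t).drop ((n :: m :: t).length / 2)).length ≤ k := by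
        simp only [List.length_drop]; simp at h ⊢; omega
      conv_lhs =>
        rw [← List.take_append_drop ((n :: m :: t).length / 2) (n :: m :: t),
          List.foldl_append]
      rw [ih _ h1 s l r, ih _ h2]
      dsimp only
      rw [String.append_assoc]

-- ===== VERDICT (by name: the statement is the Claim_ definition above) =====
theorem solution_spec : Claim_equal_solution := by
  intro numbers hand _
  show solution numbers hand = solution_alt numbers hand
  unfold solution solution_alt
  rw [fold_solve hand numbers.length numbers (le_refl _) "" (3, 0) (3, 2)]
  simp
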